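-- pv_equiv track=rewrite | github.com/zadumka/learning-python | functions.py | employee_check
-- ===== SOURCE A (Python) =====
-- def employee_check(work_hours):
--     current_max = 0
--     employee_of_month = ''
--     for employee, hours in work_hours:
--         if hours > current_max:
--             current_max = hours
--             employee_of_month = employee
--         else:
--             pass
--     return (employee_of_month, current_max)
-- ===== SOURCE B (Python) =====
-- def employee_check(work_hours):
--     ranked = sorted(work_hours, key=lambda p: p[1], reverse=True)
--     if ranked and ranked[0][1] > 0:
--         return ranked[0]
--     return ('', 0)
-- ===== Notes on version B (the rewrite author's own statement) =====
-- stated objective: simpler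
-- what changed: Replaces the running-maximum accumulator loop with a stable descending sort by hours and selection of the top entry (returned only if its hours are positive, else ('', 0)).
import Mathlib
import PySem

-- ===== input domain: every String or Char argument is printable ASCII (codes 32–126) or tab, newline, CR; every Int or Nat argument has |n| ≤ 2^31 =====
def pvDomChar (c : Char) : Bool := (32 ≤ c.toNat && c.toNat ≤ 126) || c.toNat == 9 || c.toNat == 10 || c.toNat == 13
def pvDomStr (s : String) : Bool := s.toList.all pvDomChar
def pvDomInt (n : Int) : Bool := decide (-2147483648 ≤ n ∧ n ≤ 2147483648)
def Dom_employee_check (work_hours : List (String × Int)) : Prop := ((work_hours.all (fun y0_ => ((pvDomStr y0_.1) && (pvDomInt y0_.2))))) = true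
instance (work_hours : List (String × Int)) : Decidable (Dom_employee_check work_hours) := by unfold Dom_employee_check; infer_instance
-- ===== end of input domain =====

-- B replaces A's running-maximum accumulator loop with a stable descending sort by
-- hours followed by selecting the top entry (only if its hours are positive); B is
-- shorter, not faster.


-- ===== PORT A =====
-- state is (current_max, employee_of_month), as in the Python loop
def employee_check (work_hours : List (String × Int)) : String × Int :=
  let st := work_hours.foldl
    (fun (st : Int × String) eh => if eh.2 > st.1 then (eh.2, eh.1) else st)
    (0, "")
  (st.2, st.1)

-- ===== PORT B =====
def employee_check_alt (work_hours : List (String × Int)) : String × Int :=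
  let ranked := PySem.List.sorted work_hours (fun p => p.2) true
  match ranked with
  | [] => ("", 0)
  | top :: _ => if top.2 > 0 then top else ("", 0)

-- ===== PRECONDITION & SPEC =====
def Spec_employee_check (work_hours : List (String × Int)) (out : String × Int) : Prop := out = employee_check_alt work_hours
instance (work_hours : List (String × Int)) (out : String × Int) : Decidable (Spec_employee_check work_hours out) := by unfold Spec_employee_check; infer_instance

-- ===== CLAIM (what is proved, stated in full; the proofs are below) =====
def Claim_equal_employee_check : Prop := ∀ (work_hours : List (String × Int)), Dom_employee_check work_hours → Spec_employee_check work_hours (employee_check work_hours)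

-- ===== LEMMAS AND PROOFS =====

-- one step of "leftmost maximum" (earlier element wins ties)
def pvBump (o : Option (String × Int)) (x : String × Int) : Option (String × Int) :=
  match o with
  | none => some x
  | some y => if x.2 > y.2 then some x else some y

-- leftmost element with maximal hours, as a right-hand recursion
def pvFm : List (String × Int) → Option (String × Int)
  | [] => none
  | x :: t => some (match pvFm t with | none => x | some w => if w.2 > x.2 then w else x)

-- the insertBy step used by PySem.List.sorted … true with key (·.2)
def pvIns (a : List (String × Int)) (x : String × Int) : List (String × Int) :=
  PySem.List.insertBy (fun a b => decide (b.2 < a.2)) x a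

lemma head_pvIns (x : String × Int) (acc : List (String × Int)) :
    (pvIns acc x).head? = pvBump acc.head? x := by
  cases acc with
  | nil => rfl
  | cons y ys =>
    simp only [pvIns, PySem.List.insertBy, pvBump, gt_iff_lt]
    split <;> simp_all

lemma head_foldl_pvIns : ∀ (rest acc : List (String × Int)),
    (rest.foldl pvIns acc).head? = rest.foldl pvBump acc.head? := by
  intro rest
  induction rest with
  | nil => intro acc; rfl
  | cons x t ih =>
    intro acc
    simp only [List.foldl_cons]
    rw [ih, head_pvIns]

lemma foldl_pvBump_some : ∀ (t : List (String × Int)) (y : String × Int),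
    t.foldl pvBump (some y)
      = some (match pvFm t with | none => y | some w => if w.2 > y.2 then w else y) := by
  intro t
  induction t with
  | nil => intro y; rfl
  | cons x t ih =>
    intro y
    simp only [List.foldl_cons, pvBump]
    rw [show (if x.2 > y.2 then some x else some y) = some (if x.2 > y.2 then x else y) by split <;> rfl]
    rw [ih]
    simp only [pvFm]
    rcases h : pvFm t with _ | w
    · simp only []
    · simp only []
      split_ifs <;> simp_all <;> omega

lemma foldl_pvBump_none (xs : List (String × Int)) :
    xs.foldl pvBump none = pvFm xs := by
  cases xs with
  | nil => rfl
  | cons x t =>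
    simp only [List.foldl_cons, pvBump, pvFm]
    exact foldl_pvBump_some t x

lemma employee_check_alt_eq_fm (xs : List (String × Int)) :
    employee_check_alt xs
      = (match pvFm xs with | none => ("", 0) | some w => if w.2 > 0 then w else ("", 0)) := by
  have hs : PySem.List.sorted xs (fun p : String × Int => p.2) true = xs.foldl pvIns [] := by
    rw [PySem.List.sorted_rev_eq_foldl_insertBy]; rfl
  have hh : (PySem.List.sorted xs (fun p : String × Int => p.2) true).head? = pvFm xs := by
    rw [hs, head_foldl_pvIns]
    exact foldl_pvBump_none xs
  unfold employee_check_alt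
  rcases hr : PySem.List.sorted xs (fun p : String × Int => p.2) true with _ | ⟨top, rest⟩ <;>
    rw [hr] at hh <;> simp only [List.head?] at hh
  · rw [← hh]
  · rw [← hh]

lemma foldA_bump : ∀ (t : List (String × Int)) (y z : String × Int),
    t.foldl pvBump (some y) = some z →
    t.foldl (fun (st : Int × String) eh => if eh.2 > st.1 then (eh.2, eh.1) else st) (y.2, y.1)
      = (z.2, z.1) := by
  intro t
  induction t with
  | nil => intro y z h; simp only [List.foldl_nil] at h ⊢; rw [← Option.some.injEq y z |>.mp h]
  | cons x t ih =>
    intro y z h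
    simp only [List.foldl_cons, pvBump] at h ⊢
    by_cases hc : x.2 > y.2
    · rw [if_pos hc] at h ⊢; exact ih x z h
    · rw [if_neg hc] at h ⊢; exact ih y z h

lemma employee_check_eq_fm (xs : List (String × Int)) :
    employee_check xs
      = (match pvFm xs with | none => ("", 0) | some w => if w.2 > 0 then w else ("", 0)) := by
  have h1 : xs.foldl pvBump (some (("", 0) : String × Int))
      = some (match pvFm xs with | none => ("", 0) | some w => if w.2 > 0 then w else ("", 0)) := by
    rw [foldl_pvBump_some]
  have h2 := foldA_bump xs ("", 0) _ h1
  unfold employee_check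
  simp only []
  rw [h2]

-- ===== VERDICT (by name: the statement is the Claim_ definition above) =====
theorem employee_check_spec : Claim_equal_employee_check := by
  intro xs _
  unfold Spec_employee_check
  rw [employee_check_eq_fm, employee_check_alt_eq_fm]
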